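-- pv_equiv track=rewrite | github.com/MrBrantCode/unitest_baseline | mut_generate/mist_train_cf/cf_79943/solution.py | reverse_order_ignore_punctuation
-- ===== SOURCE A (Python) =====
-- def reverse_order_ignore_punctuation(s):
--     import string
--
--     words = []
--     word = ''
--     punctuation = ''
--     for ch in s:
--         if ch not in string.punctuation + ' ':
--             if punctuation:
--                  word += punctuation
--                  punctuation = ''
--             word += ch
--         else:
--             if word:
--                 words.append(word)
--                 word = ''
--             if ch in string.punctuation:
--                 punctuation += ch
--             else:
--                 words.append(punctuation)
--                 punctuation = ''
--                 words.append(' ')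
--
--     if word:
--         words.append(word)
--     if punctuation:
--         words.append(punctuation)
--
--     return ''.join(words[::-1])
-- ===== SOURCE B (Python) =====
-- import re
-- import string
--
--
-- def reverse_order_ignore_punctuation(s):
--     # One regex pass: a token is (leading punctuation glued to a word),
--     # a standalone punctuation run, or a single space; then reverse-join.
--     P = re.escape(string.punctuation)
--     tokens = re.findall('[' + P + ']*[^' + P + ' ]+|[' + P + ']+| ', s)
--     return ''.join(tokens[::-1])
-- ===== Notes on version B (the rewrite author's own statement) =====
-- stated objective: idiomatic
-- what changed: Replaced A's character-by-character state machine (three mutable accumulators word/punctuation/words with flush logic) by a single re.findall tokenization with the pattern [P]*[^P ]+|[P]+| followed by a reverse-and-join.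
import Mathlib
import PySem

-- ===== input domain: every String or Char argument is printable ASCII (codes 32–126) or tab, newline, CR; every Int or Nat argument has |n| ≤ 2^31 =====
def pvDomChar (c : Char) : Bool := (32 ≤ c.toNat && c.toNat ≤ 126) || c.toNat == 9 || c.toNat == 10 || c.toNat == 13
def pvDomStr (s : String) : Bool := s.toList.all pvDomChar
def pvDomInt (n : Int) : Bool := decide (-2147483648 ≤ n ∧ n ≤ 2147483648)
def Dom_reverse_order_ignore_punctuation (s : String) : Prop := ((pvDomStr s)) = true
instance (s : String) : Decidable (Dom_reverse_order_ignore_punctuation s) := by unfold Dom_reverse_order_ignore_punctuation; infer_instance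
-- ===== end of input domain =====

-- B replaces A's three-variable character state machine by a single regex-findall
-- tokenization pass followed by a reverse-and-join (objective: idiomatic).

-- ===== PORT A =====
-- string.punctuation, as a list of characters (shared by both ports: both Pythons use it)
def pvPunct : List Char := "!\"#$%&'()*+,-./:;<=>?@[\\]^_`{|}~".toList

-- one iteration of A's for-loop; state = (words, word, punctuation), strings as List Char
def pvStepA (st : List (List Char) × List Char × List Char) (ch : Char) :
    List (List Char) × List Char × List Char :=
  match st with
  | (words, word, punctuation) =>
    if ¬ ((pvPunct ++ [' ']).contains ch) then
      let wp : List Char × List Char :=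
        if punctuation ≠ [] then (word ++ punctuation, []) else (word, punctuation)
      (words, wp.1 ++ [ch], wp.2)
    else
      let ww : List (List Char) × List Char :=
        if word ≠ [] then (words ++ [word], []) else (words, word)
      if pvPunct.contains ch then
        (ww.1, ww.2, punctuation ++ [ch])
      else
        (ww.1 ++ [punctuation, [' ']], ww.2, [])

def reverse_order_ignore_punctuation (s : String) : String :=
  let st := s.toList.foldl pvStepA ([], [], [])
  let words₁ := if st.2.1 ≠ [] then st.1 ++ [st.2.1] else st.1
  let words₂ := if st.2.2 ≠ [] then words₁ ++ [st.2.2] else words₁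
  String.ofList words₂.reverse.flatten   -- ''.join(words[::-1])

-- ===== PORT B =====
def pvIsPunct (c : Char) : Bool := pvPunct.contains c
def pvIsWord (c : Char) : Bool := !pvIsPunct c && c ≠ ' '

-- hand port of re.findall with the pattern '[P]*[^P ]+|[P]+| '  (P = string.punctuation):
-- exact, because findall returns successive leftmost matches trying alternatives in order,
-- and the three classes (punctuation / word char / space) are disjoint, so matching is
-- deterministic: maximal punctuation-run glued to a following maximal word-run if there is
-- one, else the punctuation-run alone, else a single space.
def pvTok : List Char → List (List Char)
  | [] => []
  | c :: r =>
    if hsp : c = ' ' then [' '] :: pvTok r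
    else
      -- p := maximal punctuation run, q := what follows it, w := maximal word run after p
      if hw : ((c :: r).dropWhile pvIsPunct).takeWhile pvIsWord = [] then
        (c :: r).takeWhile pvIsPunct :: pvTok ((c :: r).dropWhile pvIsPunct)
      else
        ((c :: r).takeWhile pvIsPunct ++ ((c :: r).dropWhile pvIsPunct).takeWhile pvIsWord) ::
          pvTok (((c :: r).dropWhile pvIsPunct).dropWhile pvIsWord)
termination_by cs => cs.length
decreasing_by
  · simp
  · -- no word char follows the punctuation run, so `c` itself is punctuation
    have hc : pvIsPunct c = true := by
      by_contra h
      rw [List.dropWhile_cons_of_neg (by simpa using h),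
        List.takeWhile_cons_of_pos (by simp [pvIsWord, h, hsp])] at hw
      simp at hw
    rw [List.dropWhile_cons_of_pos hc]
    simpa using Nat.lt_succ_of_le (List.length_dropWhile_le _ _)
  · have h1 := List.length_dropWhile_le pvIsPunct (c :: r)
    have h5 := List.length_pos_of_ne_nil hw
    have h3 : (((c :: r).dropWhile pvIsPunct).dropWhile pvIsWord).length
        < ((c :: r).dropWhile pvIsPunct).length := by
      conv_rhs => rw [← List.takeWhile_append_dropWhile (p := pvIsWord)
        (l := (c :: r).dropWhile pvIsPunct)]
      simp only [List.length_append]; omega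
    simp only [List.length_cons] at *; omega

def reverse_order_ignore_punctuation_alt (s : String) : String :=
  String.ofList (pvTok s.toList).reverse.flatten   -- ''.join(tokens[::-1])

-- ===== PRECONDITION & SPEC =====
def Spec_reverse_order_ignore_punctuation (s : String) (out : String) : Prop := out = reverse_order_ignore_punctuation_alt s
instance (s : String) (out : String) : Decidable (Spec_reverse_order_ignore_punctuation s out) := by unfold Spec_reverse_order_ignore_punctuation; infer_instance

-- ===== CLAIM (what is proved, stated in full; the proofs are below) =====
def Claim_equal_reverse_order_ignore_punctuation : Prop := ∀ (s : String), Dom_reverse_order_ignore_punctuation s → Spec_reverse_order_ignore_punctuation s (reverse_order_ignore_punctuation s)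

-- ===== LEMMAS AND PROOFS =====

-- loop invariant shapes: A's `punctuation` is all-punctuation; A's `word` is empty or a
-- punctuation-run followed by a nonempty word-char run
def pvAllP (xs : List Char) : Prop := ∀ c ∈ xs, pvIsPunct c = true
def pvAllW (xs : List Char) : Prop := ∀ c ∈ xs, pvIsWord c = true
def pvWfW (w : List Char) : Prop :=
  w = [] ∨ ∃ a b, w = a ++ b ∧ pvAllP a ∧ pvAllW b ∧ b ≠ []

theorem pvPunct_not_space {c : Char} (h : pvIsPunct c = true) : c ≠ ' ' := by
  rintro rfl; simp [pvIsPunct, pvPunct] at h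

theorem pvWord_not_space {c : Char} (h : pvIsWord c = true) : c ≠ ' ' := by
  simp [pvIsWord] at h; exact h.2

theorem pvWord_not_punct {c : Char} (h : pvIsWord c = true) : pvIsPunct c = false := by
  simp [pvIsWord] at h; exact h.1

theorem pvWord_of_classes {c : Char} (h1 : pvIsPunct c = false) (h2 : c ≠ ' ') :
    pvIsWord c = true := by simp [pvIsWord, h1, h2]

-- unfolding lemmas for the tokenizer
theorem pvTok_nil : pvTok [] = [] := by rw [pvTok]

theorem pvTok_space (cs : List Char) : pvTok (' ' :: cs) = [' '] :: pvTok cs := by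
  rw [pvTok]; simp

theorem pvTok_punct_pre (p rest : List Char) (hp : pvAllP p) (hne : p ≠ [])
    (hrest : rest = [] ∨ ∃ rs, rest = ' ' :: rs) :
    pvTok (p ++ rest) = p :: pvTok rest := by
  obtain ⟨c, p', rfl⟩ := List.exists_cons_of_ne_nil hne
  have hc : pvIsPunct c = true := hp c (by simp)
  rw [List.cons_append, pvTok]
  have hcs : ¬ (c = ' ') := pvPunct_not_space hc
  have htw : (c :: (p' ++ rest)).takeWhile pvIsPunct = c :: p' := by
    rw [show c :: (p' ++ rest) = (c :: p') ++ rest by simp,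
      List.takeWhile_append_of_pos (by intro x hx; exact hp x hx)]
    rcases hrest with rfl | ⟨rs, rfl⟩
    · simp
    · rw [List.takeWhile_cons_of_neg (by decide)]; simp
  have hdw : (c :: (p' ++ rest)).dropWhile pvIsPunct = rest := by
    rw [show c :: (p' ++ rest) = (c :: p') ++ rest by simp,
      List.dropWhile_append_of_pos (by intro x hx; exact hp x hx)]
    rcases hrest with rfl | ⟨rs, rfl⟩
    · simp
    · rw [List.dropWhile_cons_of_neg (by decide)]
  have hwtake : rest.takeWhile pvIsWord = [] := by
    rcases hrest with rfl | ⟨rs, rfl⟩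
    · simp
    · exact List.takeWhile_cons_of_neg (by decide)
  simp only [dif_neg hcs, htw, hdw, hwtake, dif_pos]

theorem pvAllP_nil : pvAllP [] := fun x hx => by cases hx
theorem pvAllW_nil : pvAllW [] := fun x hx => by cases hx

theorem pvAllP_append_singleton {p : List Char} {c : Char} (hp : pvAllP p)
    (hc : pvIsPunct c = true) : pvAllP (p ++ [c]) := by
  intro x hx
  rcases List.mem_append.1 hx with h | h
  · exact hp x h
  · simp at h; subst h; exact hc

theorem pvAllW_append_singleton {b : List Char} {c : Char} (hb : pvAllW b)
    (hc : pvIsWord c = true) : pvAllW (b ++ [c]) := by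
  intro x hx
  rcases List.mem_append.1 hx with h | h
  · exact hb x h
  · simp at h; subst h; exact hc

theorem pvTok_word_pre (a b rest : List Char) (ha : pvAllP a) (hb : pvAllW b) (hbne : b ≠ [])
    (hrest : rest = [] ∨ ∃ c rs, rest = c :: rs ∧ pvIsWord c = false) :
    pvTok (a ++ b ++ rest) = (a ++ b) :: pvTok rest := by
  have hwtake : (b ++ rest).takeWhile pvIsWord = b := by
    rw [List.takeWhile_append_of_pos hb]
    rcases hrest with rfl | ⟨c, rs, rfl, hcw⟩
    · simp
    · rw [List.takeWhile_cons_of_neg (by simp [hcw])]; simp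
  have hwdrop : (b ++ rest).dropWhile pvIsWord = rest := by
    rw [List.dropWhile_append_of_pos hb]
    rcases hrest with rfl | ⟨c, rs, rfl, hcw⟩
    · simp
    · rw [List.dropWhile_cons_of_neg (by simp [hcw])]
  obtain ⟨d, b', rfl⟩ := List.exists_cons_of_ne_nil hbne
  have hd : pvIsWord d = true := hb d (by simp)
  have hpd : pvIsPunct d = false := pvWord_not_punct hd
  have htp : ((d :: b') ++ rest).takeWhile pvIsPunct = [] :=
    List.takeWhile_cons_of_neg (by simp [hpd])
  have hdp : ((d :: b') ++ rest).dropWhile pvIsPunct = (d :: b') ++ rest :=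
    List.dropWhile_cons_of_neg (by simp [hpd])
  rcases a with _ | ⟨e, a'⟩
  · rw [List.nil_append, show (d :: b') ++ rest = d :: (b' ++ rest) from rfl, pvTok,
      dif_neg (pvWord_not_space hd)]
    rw [show d :: (b' ++ rest) = (d :: b') ++ rest from rfl, hdp, htp, hwtake,
      dif_neg (by simp), hwdrop]
    simp
  · have he : pvIsPunct e = true := ha e (by simp)
    have htp2 : ((e :: a') ++ (d :: b') ++ rest).takeWhile pvIsPunct = e :: a' := by
      rw [List.append_assoc, List.takeWhile_append_of_pos ha, htp]; simp
    have hdp2 : ((e :: a') ++ (d :: b') ++ rest).dropWhile pvIsPunct = (d :: b') ++ rest := by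
      rw [List.append_assoc, List.dropWhile_append_of_pos ha, hdp]
    rw [show (e :: a') ++ (d :: b') ++ rest = e :: (a' ++ (d :: b') ++ rest) from by simp, pvTok,
      dif_neg (pvPunct_not_space he)]
    rw [show e :: (a' ++ (d :: b') ++ rest) = (e :: a') ++ (d :: b') ++ rest from by simp,
      hdp2, htp2, hwtake, dif_neg (by simp), hwdrop]

-- finish: A's post-loop flushes + reverse + join, as a function of the final state
def pvFinish (st : List (List Char) × List Char × List Char) : List Char :=
  let words₁ := if st.2.1 ≠ [] then st.1 ++ [st.2.1] else st.1
  let words₂ := if st.2.2 ≠ [] then words₁ ++ [st.2.2] else words₁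
  words₂.reverse.flatten

theorem pvFinish_append (ws ws' : List (List Char)) (rest : List Char × List Char) :
    pvFinish (ws ++ ws', rest) = pvFinish (ws', rest) ++ ws.reverse.flatten := by
  obtain ⟨w, p⟩ := rest
  unfold pvFinish; split_ifs <;> simp

theorem pvStepA_words (ws : List (List Char)) (w p : List Char) (c : Char) :
    pvStepA (ws, w, p) c =
      (ws ++ (pvStepA ([], w, p) c).1, (pvStepA ([], w, p) c).2) := by
  simp only [pvStepA]
  split_ifs <;> simp

theorem pvFoldl_acc (cs : List Char) (ws : List (List Char)) (w p : List Char) :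
    cs.foldl pvStepA (ws, w, p) =
      (ws ++ (cs.foldl pvStepA ([], w, p)).1, (cs.foldl pvStepA ([], w, p)).2) := by
  induction cs generalizing ws w p with
  | nil => simp
  | cons c cs ih =>
    simp only [List.foldl_cons]
    rw [pvStepA_words]
    obtain ⟨ws', w', p'⟩ := pvStepA ([], w, p) c
    rw [ih, ih ws' w' p']
    simp

theorem pvStepA_eval_word {c : Char} (hc : pvIsWord c = true) (w p : List Char) :
    pvStepA ([], w, p) c = ([], w ++ p ++ [c], []) := by
  have hnp : c ∉ pvPunct := by
    have := pvWord_not_punct hc; simpa [pvIsPunct] using this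
  have hs : c ≠ ' ' := pvWord_not_space hc
  by_cases hpe : p = [] <;> simp [pvStepA, hnp, hs, hpe]

theorem pvStepA_eval_punct {c : Char} (hc : pvIsPunct c = true) (w p : List Char) :
    pvStepA ([], w, p) c = ((if w ≠ [] then [w] else []), [], p ++ [c]) := by
  have hmem : c ∈ pvPunct := by simpa [pvIsPunct] using hc
  by_cases hwe : w = [] <;> simp [pvStepA, hmem, hwe]

theorem pvStepA_eval_space (w p : List Char) :
    pvStepA ([], w, p) ' ' = ((if w ≠ [] then [w] else []) ++ [p, [' ']], [], []) := by
  by_cases hwe : w = [] <;>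
    simp [pvStepA, hwe, show ' ' ∉ pvPunct from by decide]

theorem pvFlush_flat (w : List Char) :
    ((if w ≠ [] then [w] else []) : List (List Char)).reverse.flatten = w := by
  split_ifs <;> simp_all

theorem pvMain (cs : List Char) (w p : List Char)
    (hw : pvWfW w) (hp : pvAllP p) (hwp : p ≠ [] → w = []) :
    pvFinish (cs.foldl pvStepA ([], w, p)) = (pvTok (w ++ p ++ cs)).reverse.flatten := by
  induction cs generalizing w p with
  | nil =>
    rcases eq_or_ne p [] with rfl | hpne
    · rcases hw with rfl | ⟨a, b, rfl, ha, hb, hbne⟩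
      · simp [pvFinish, pvTok_nil]
      · rw [List.foldl_nil, show (a ++ b) ++ [] ++ [] = a ++ b ++ [] from by simp,
          pvTok_word_pre a b [] ha hb hbne (Or.inl rfl), pvTok_nil]
        simp [pvFinish, hbne]
    · have hwe : w = [] := hwp hpne
      subst hwe
      rw [List.foldl_nil, show ([] : List Char) ++ p ++ [] = p ++ ([] : List Char) from by simp,
        pvTok_punct_pre p [] hp hpne (Or.inl rfl), pvTok_nil]
      simp [pvFinish, hpne]
  | cons c cs ih =>
    by_cases hsp : c = ' '
    · subst hsp
      rw [List.foldl_cons, pvStepA_eval_space, pvFoldl_acc, pvFinish_append, Prod.mk.eta,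
        ih [] [] (Or.inl rfl) pvAllP_nil (fun _ => rfl)]
      have hrev : (((if w ≠ [] then [w] else []) ++ [p, [' ']]) : List (List Char)).reverse.flatten
          = ' ' :: (p ++ w) := by
        split_ifs with h <;> simp_all
      rw [hrev]
      rcases eq_or_ne p [] with rfl | hpne
      · rcases hw with rfl | ⟨a, b, rfl, ha, hb, hbne⟩
        · simp [pvTok_space]
        · rw [show (a ++ b) ++ [] ++ (' ' :: cs) = a ++ b ++ (' ' :: cs) from by simp,
            pvTok_word_pre a b (' ' :: cs) ha hb hbne (Or.inr ⟨' ', cs, rfl, by decide⟩),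
            pvTok_space]
          simp
      · have hwe : w = [] := hwp hpne; subst hwe
        rw [show ([] : List Char) ++ p ++ (' ' :: cs) = p ++ (' ' :: cs) from by simp,
          pvTok_punct_pre p (' ' :: cs) hp hpne (Or.inr ⟨cs, rfl⟩), pvTok_space]
        simp
    · by_cases hpc : pvIsPunct c = true
      · rw [List.foldl_cons, pvStepA_eval_punct hpc, pvFoldl_acc, pvFinish_append, Prod.mk.eta,
          ih [] (p ++ [c]) (Or.inl rfl) (pvAllP_append_singleton hp hpc) (fun _ => rfl),
          pvFlush_flat]
        rcases eq_or_ne w [] with rfl | hwne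
        · simp
        · have hpe : p = [] := by
            by_contra hpe; exact hwne (hwp hpe)
          subst hpe
          rcases hw with rfl | ⟨a, b, rfl, ha, hb, hbne⟩
          · simp at hwne
          · rw [show (a ++ b) ++ [] ++ (c :: cs) = a ++ b ++ (c :: cs) from by simp,
              pvTok_word_pre a b (c :: cs) ha hb hbne
                (Or.inr ⟨c, cs, rfl, by simp [pvIsWord, hpc]⟩)]
            simp
      · have hcw : pvIsWord c = true := pvWord_of_classes (by simpa using hpc) hsp
        rw [List.foldl_cons, pvStepA_eval_word hcw]
        have hw' : pvWfW (w ++ p ++ [c]) := by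
          rcases eq_or_ne p [] with rfl | hpne
          · rcases hw with rfl | ⟨a, b, rfl, ha, hb, hbne⟩
            · exact Or.inr ⟨[], [c], by simp, pvAllP_nil,
                pvAllW_append_singleton pvAllW_nil hcw, by simp⟩
            · exact Or.inr ⟨a, b ++ [c], by simp, ha,
                pvAllW_append_singleton hb hcw, by simp⟩
          · have hwe : w = [] := hwp hpne; subst hwe
            exact Or.inr ⟨p, [c], by simp, hp,
              pvAllW_append_singleton pvAllW_nil hcw, by simp⟩
        rw [ih (w ++ p ++ [c]) [] hw' pvAllP_nil (fun h => by simp at h)]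
        congr 2
        simp

-- ===== VERDICT (by name: the statement is the Claim_ definition above) =====
theorem reverse_order_ignore_punctuation_spec : Claim_equal_reverse_order_ignore_punctuation := by
  intro s _
  unfold Spec_reverse_order_ignore_punctuation
  show reverse_order_ignore_punctuation s = _
  have h := pvMain s.toList [] [] (Or.inl rfl) pvAllP_nil (fun _ => rfl)
  simp only [List.nil_append] at h
  unfold reverse_order_ignore_punctuation reverse_order_ignore_punctuation_alt
  rw [← h]; rfl
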